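-- pv_equiv track=rewrite | github.com/marlonmmalgas-oss/AGL-Vessel-Report | HourlyReport3.py | generate_hours
-- ===== SOURCE A (Python) =====
-- def generate_hours(shift):
--     hours = []
--     if shift == "DAY":
--         start = 6
--     else:
--         start = 18
--
--     for i in range(12):
--         h1 = (start + i) % 24
--         h2 = (start + i + 1) % 24
--         hours.append(f"{h1:02d}00-{h2:02d}00")
--     return hours
-- ===== SOURCE B (Python) =====
-- _HOURS = {
--     "DAY": ["0600-0700", "0700-0800", "0800-0900", "0900-1000",
--             "1000-1100", "1100-1200", "1200-1300", "1300-1400",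
--             "1400-1500", "1500-1600", "1600-1700", "1700-1800"],
--     "NIGHT": ["1800-1900", "1900-2000", "2000-2100", "2100-2200",
--               "2200-2300", "2300-0000", "0000-0100", "0100-0200",
--               "0200-0300", "0300-0400", "0400-0500", "0500-0600"],
-- }
--
-- def generate_hours(shift):
--     key = "DAY" if shift == "DAY" else "NIGHT"
--     return list(_HOURS[key])
-- ===== Notes on version B (the rewrite author's own statement) =====
-- stated objective: simpler
-- what changed: B replaces the loop with modular arithmetic and runtime string formatting by a lookup into two precomputed literal tables (the function has exactly two possible outputs, keyed on shift == 'DAY').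
import Mathlib
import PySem

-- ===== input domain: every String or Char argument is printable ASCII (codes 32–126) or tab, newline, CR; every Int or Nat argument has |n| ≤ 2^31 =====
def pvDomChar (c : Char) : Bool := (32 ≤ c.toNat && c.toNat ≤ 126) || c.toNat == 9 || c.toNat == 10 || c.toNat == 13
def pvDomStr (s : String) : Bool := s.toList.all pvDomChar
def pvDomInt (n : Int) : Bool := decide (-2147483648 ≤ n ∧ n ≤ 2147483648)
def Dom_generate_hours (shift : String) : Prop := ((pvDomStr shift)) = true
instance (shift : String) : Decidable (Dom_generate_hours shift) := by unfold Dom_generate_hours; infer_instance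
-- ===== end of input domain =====

-- B replaces A's modular-arithmetic formatting loop by a lookup into two precomputed literal tables (simpler).


-- ===== PORT A =====
-- f"{h:02d}00" : two-digit zero-padded hour followed by "00" (exact for 0 ≤ h < 24)
def pvFmt2 (h : Int) : String :=
  if h < 10 then "0" ++ PySem.Int.toStr h else PySem.Int.toStr h

def generate_hours (shift : String) : List String :=
  let start : Int := if shift == "DAY" then 6 else 18
  (PySem.List.pyRange 0 12 1).foldl
    (fun hours i =>
      let h1 := PySem.Int.mod (start + i) 24
      let h2 := PySem.Int.mod (start + i + 1) 24
      hours ++ [pvFmt2 h1 ++ "00-" ++ pvFmt2 h2 ++ "00"]) []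

-- ===== PORT B =====
-- module-level _HOURS dict of Source B, ported as two named constant tables
def pvDayHours : List String :=
  ["0600-0700", "0700-0800", "0800-0900", "0900-1000",
   "1000-1100", "1100-1200", "1200-1300", "1300-1400",
   "1400-1500", "1500-1600", "1600-1700", "1700-1800"]

def pvNightHours : List String :=
  ["1800-1900", "1900-2000", "2000-2100", "2100-2200",
   "2200-2300", "2300-0000", "0000-0100", "0100-0200",
   "0200-0300", "0300-0400", "0400-0500", "0500-0600"]

def generate_hours_alt (shift : String) : List String :=
  if shift == "DAY" then pvDayHours else pvNightHours

-- ===== PRECONDITION & SPEC =====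
def Spec_generate_hours (shift : String) (out : List String) : Prop := out = generate_hours_alt shift
instance (shift : String) (out : List String) : Decidable (Spec_generate_hours shift out) := by unfold Spec_generate_hours; infer_instance

-- ===== CLAIM =====
def Claim_equal_generate_hours : Prop := ∀ (shift : String), Dom_generate_hours shift → Spec_generate_hours shift (generate_hours shift)

-- ===== LEMMAS AND PROOFS =====

-- ===== VERDICT =====
theorem generate_hours_spec : Claim_equal_generate_hours := by
  intro shift _
  unfold Spec_generate_hours generate_hours generate_hours_alt
  by_cases h : shift == "DAY" <;> simp only [h] <;> rfl
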